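-- pv_equiv track=rewrite | github.com/natalka1122/advent_of_code | 2025/03/main1.py | f
-- ===== SOURCE A (Python) =====
-- def f(line: list[int]) -> int:
--     for first in range(9, 0, -1):
--         try:
--             first_index = line.index(first)
--         except ValueError:
--             continue
--         for second in range(9, 0, -1):
--             if second in line[first_index + 1 :]:
--                 return 10 * first + second
--     return 0
-- ===== SOURCE B (Python) =====
-- def f(line: list[int]) -> int:
--     best = 0
--     max_first = None
--     for x in line:
--         if 1 <= x <= 9:
--             if max_first is not None:
--                 best = max(best, 10 * max_first + x)
--             max_first = x if max_first is None else max(max_first, x)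
--     return best
-- ===== Notes on version B (the rewrite author's own statement) =====
-- stated objective: faster
-- what changed: Replaces the 81-combination search with repeated list.index/membership scans by a single forward pass keeping the largest digit seen so far and the best 10*a+b pair.
import Mathlib
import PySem

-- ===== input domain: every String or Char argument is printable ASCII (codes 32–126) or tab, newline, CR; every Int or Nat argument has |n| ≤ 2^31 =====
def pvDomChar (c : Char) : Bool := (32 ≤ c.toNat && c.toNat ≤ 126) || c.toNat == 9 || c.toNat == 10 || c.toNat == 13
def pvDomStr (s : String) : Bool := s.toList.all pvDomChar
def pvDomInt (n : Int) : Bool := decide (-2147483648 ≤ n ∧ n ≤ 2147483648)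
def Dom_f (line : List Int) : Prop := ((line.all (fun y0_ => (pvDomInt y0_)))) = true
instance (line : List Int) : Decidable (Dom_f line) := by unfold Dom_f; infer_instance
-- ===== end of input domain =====

-- B replaces A's 81-combination search with repeated index/membership scans by one
-- forward pass keeping the largest digit seen so far and the best pair value (faster, one pass).

-- ===== PORT A =====
-- inner loop: "for second in range(9,0,-1): if second in line[first_index+1:]: return 10*first+second"
def fInner (s : List Int) : List Int → Option Int
  | [] => none
  | sec :: rest => if sec ∈ s then some sec else fInner s rest

-- outer loop: "for first in range(9,0,-1): try: i = line.index(first) except ValueError: continue; …"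
def fOuter (line : List Int) : List Int → Int
  | [] => 0
  | first :: rest =>
    match PySem.List.index? line first with
    | none => fOuter line rest
    | some i =>
      match fInner (PySem.List.slice line (some ((i : Int) + 1)) none) (PySem.List.pyRange 9 0 (-1)) with
      | some second => 10 * first + second
      | none => fOuter line rest

def f (line : List Int) : Int := fOuter line (PySem.List.pyRange 9 0 (-1))

-- ===== PORT B =====
-- one forward pass; state = (best, max_first)
def fAltStep (st : Int × Option Int) (x : Int) : Int × Option Int :=
  if 1 ≤ x ∧ x ≤ 9 then
    (match st.2 with
      | some m => (max st.1 (10 * m + x), some (max m x))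
      | none => (st.1, some x))
  else st

def f_alt (line : List Int) : Int := (line.foldl fAltStep (0, none)).1

-- ===== PRECONDITION & SPEC =====
def Spec_f (line : List Int) (out : Int) : Prop := out = f_alt line
instance (line : List Int) (out : Int) : Decidable (Spec_f line out) := by unfold Spec_f; infer_instance

-- ===== CLAIM (what is proved, stated in full; the proofs are below) =====
def Claim_equal_f : Prop := ∀ (line : List Int), Dom_f line → Spec_f line (f line)

-- ===== LEMMAS AND PROOFS =====

-- max over digits b of l of 10*a + b, 0 if none
def maxWith (a : Int) : List Int → Int
  | [] => 0
  | b :: r => if 1 ≤ b ∧ b ≤ 9 then max (10 * a + b) (maxWith a r) else maxWith a r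

-- max over pairs (x before b, both digits, x ≤ n) of 10*x + b, 0 if none
def maxPairA (n : Int) : List Int → Int
  | [] => 0
  | x :: r => if 1 ≤ x ∧ x ≤ n then max (maxWith x r) (maxPairA n r) else maxPairA n r

-- largest digit (1..9) of l, 0 if none
def maxDigit : List Int → Int
  | [] => 0
  | b :: r => if 1 ≤ b ∧ b ≤ 9 then max b (maxDigit r) else maxDigit r

-- suffix after the first occurrence of n, if n occurs
def afterFirst (n : Int) : List Int → Option (List Int)
  | [] => none
  | x :: r => if x = n then some r else afterFirst n r

def contrib (n : Int) (l : List Int) : Int :=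
  match afterFirst n l with
  | none => 0
  | some s => maxWith n s

-- the list [j, j-1, ..., 1]
def descList : Nat → List Int
  | 0 => []
  | j + 1 => ((j : Int) + 1) :: descList j

theorem maxWith_nonneg (a : Int) (l : List Int) : 0 ≤ maxWith a l := by
  induction l with
  | nil => simp [maxWith]
  | cons b r ih => simp only [maxWith]; split_ifs <;> omega

theorem maxPairA_nonneg (n : Int) (l : List Int) : 0 ≤ maxPairA n l := by
  induction l with
  | nil => simp [maxPairA]
  | cons x r ih =>
    simp only [maxPairA]; split_ifs with h
    · exact le_max_of_le_right ih
    · exact ih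

theorem maxDigit_nonneg (l : List Int) : 0 ≤ maxDigit l := by
  induction l with
  | nil => simp [maxDigit]
  | cons b r ih => simp only [maxDigit]; split_ifs <;> omega

theorem maxDigit_le (l : List Int) : maxDigit l ≤ 9 := by
  induction l with
  | nil => simp [maxDigit]
  | cons b r ih => simp only [maxDigit]; split_ifs <;> omega

theorem maxWith_eq (a : Int) (l : List Int) (ha : 1 ≤ a) :
    maxWith a l = if maxDigit l ≤ 0 then 0 else 10 * a + maxDigit l := by
  induction l with
  | nil => simp [maxWith, maxDigit]
  | cons b r ih =>
    have h0 := maxDigit_nonneg r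
    simp only [maxWith, maxDigit]
    split_ifs with hd h1 h2 <;> rw [ih] <;> split_ifs <;> omega

theorem maxWith_le (a : Int) (l : List Int) (ha : 1 ≤ a) : maxWith a l ≤ 10 * a + 9 := by
  have := maxDigit_nonneg l
  have := maxDigit_le l
  rw [maxWith_eq a l ha]; split_ifs <;> omega

theorem maxPairA_le (n : Int) (l : List Int) : maxPairA n l ≤ max 0 (10 * n + 9) := by
  induction l with
  | nil => simp [maxPairA]
  | cons x r ih =>
    simp only [maxPairA]; split_ifs with h
    · have hx := maxWith_le x r h.1
      have : maxWith x r ≤ 10 * n + 9 := le_trans hx (by omega)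
      omega
    · exact ih

theorem maxWith_max (m a : Int) (l : List Int) :
    maxWith (max m a) l = max (maxWith m l) (maxWith a l) := by
  induction l with
  | nil => simp [maxWith]
  | cons b r ih =>
    have h1 := maxWith_nonneg m r
    have h2 := maxWith_nonneg a r
    simp only [maxWith]; split_ifs with h
    · rw [ih]; omega
    · exact ih

theorem maxDigit_mem (l : List Int) (h : 1 ≤ maxDigit l) : maxDigit l ∈ l := by
  induction l with
  | nil => simp [maxDigit] at h
  | cons b r ih =>
    simp only [maxDigit] at h ⊢
    split_ifs at h ⊢ with hb
    · rcases max_cases b (maxDigit r) with ⟨he, _⟩ | ⟨he, hlt⟩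
      · rw [he]; exact List.mem_cons_self
      · rw [he]; exact List.mem_cons_of_mem _ (ih (by omega))
    · exact List.mem_cons_of_mem _ (ih h)

theorem le_maxDigit (l : List Int) (b : Int) (hb : b ∈ l) (h1 : 1 ≤ b) (h9 : b ≤ 9) :
    b ≤ maxDigit l := by
  induction l with
  | nil => simp at hb
  | cons x r ih =>
    have := maxDigit_nonneg r
    rcases List.mem_cons.1 hb with rfl | hb'
    · simp only [maxDigit]; split_ifs <;> omega
    · have := ih hb'
      simp only [maxDigit]; split_ifs <;> omega

-- the inner loop scanning j, j-1, …, 1 returns the maximal digit of s, if any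
theorem fInner_desc (s : List Int) (j : Nat) (hj : (j : Int) ≤ 9) (hms : maxDigit s ≤ (j : Int)) :
    fInner s (descList j) = if maxDigit s ≤ 0 then none else some (maxDigit s) := by
  induction j with
  | zero =>
    simp only [descList, fInner]
    rw [if_pos (by exact_mod_cast hms)]
  | succ j ih =>
    simp only [descList, fInner]
    by_cases hmem : ((j : Int) + 1) ∈ s
    · have h1 : (j : Int) + 1 ≤ maxDigit s :=
        le_maxDigit s _ hmem (by omega) (by push_cast at hj ⊢; omega)
      rw [if_pos hmem, if_neg (by omega)]
      have he : maxDigit s = (j : Int) + 1 := by push_cast at hms; omega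
      rw [he]
    · rw [if_neg hmem]
      apply ih (by push_cast at hj ⊢; omega)
      by_cases hz : maxDigit s ≤ 0
      · omega
      · have hm9 := maxDigit_le s
        have hmm := maxDigit_mem s (by omega)
        push_cast at hms ⊢
        by_contra hgt
        have : maxDigit s = (j : Int) + 1 := by omega
        exact hmem (this ▸ hmm)

theorem fInner_char (s : List Int) :
    fInner s (PySem.List.pyRange 9 0 (-1)) =
      if maxDigit s ≤ 0 then none else some (maxDigit s) := by
  have hr : PySem.List.pyRange 9 0 (-1) = descList 9 := by decide
  rw [hr]
  exact fInner_desc s 9 (by norm_num) (le_trans (maxDigit_le s) (by norm_num))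

theorem afterFirst_eq_none (n : Int) (l : List Int) (h : n ∉ l) : afterFirst n l = none := by
  induction l with
  | nil => simp [afterFirst]
  | cons x r ih =>
    simp only [afterFirst]
    rw [if_neg (by rintro rfl; exact h List.mem_cons_self)]
    exact ih (fun hm => h (List.mem_cons_of_mem _ hm))

theorem afterFirst_append (n : Int) (pre suf : List Int) (h : n ∉ pre) :
    afterFirst n (pre ++ n :: suf) = some suf := by
  induction pre with
  | nil => simp [afterFirst]
  | cons x p ih =>
    simp only [List.cons_append, afterFirst]
    rw [if_neg (by rintro rfl; exact h List.mem_cons_self)]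
    exact ih (fun hm => h (List.mem_cons_of_mem _ hm))

theorem contrib_cons_self (n : Int) (r : List Int) : contrib n (n :: r) = maxWith n r := by
  simp [contrib, afterFirst]

theorem contrib_cons_ne (n x : Int) (r : List Int) (h : x ≠ n) :
    contrib n (x :: r) = contrib n r := by
  simp [contrib, afterFirst, h]

theorem contrib_le_maxWith (n : Int) (l : List Int) : contrib n l ≤ maxWith n l := by
  induction l with
  | nil => simp [contrib, afterFirst, maxWith]
  | cons x r ih =>
    by_cases hx : x = n
    · subst hx
      rw [contrib_cons_self]
      simp only [maxWith]
      split_ifs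
      · exact le_max_right _ _
      · exact le_rfl
    · rw [contrib_cons_ne n x r hx]
      simp only [maxWith]
      split_ifs
      · exact le_trans ih (le_max_right _ _)
      · exact ih

-- core decomposition of the bounded pair-max by its largest admissible first digit
theorem maxPairA_step (n : Int) (hn : 1 ≤ n) (l : List Int) :
    maxPairA n l = max (contrib n l) (maxPairA (n - 1) l) := by
  induction l with
  | nil => simp [maxPairA, contrib, afterFirst]
  | cons x r ih =>
    by_cases hx : x = n
    · subst hx
      rw [contrib_cons_self]
      have hle := contrib_le_maxWith x r
      have h2 := maxPairA_nonneg (x - 1) r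
      simp only [maxPairA, if_pos (And.intro hn le_rfl)]
      have hni : ¬ (1 ≤ x ∧ x ≤ x - 1) := by omega
      rw [if_neg hni, ih]
      omega
    · rw [contrib_cons_ne n x r hx]
      simp only [maxPairA]
      have hiff : (1 ≤ x ∧ x ≤ n) ↔ (1 ≤ x ∧ x ≤ n - 1) := by omega
      by_cases hd : 1 ≤ x ∧ x ≤ n
      · rw [if_pos hd, if_pos (hiff.1 hd), ih]; omega
      · rw [if_neg hd, if_neg (fun h => hd (hiff.2 h)), ih]

theorem maxPairA_zero (l : List Int) : maxPairA 0 l = 0 := by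
  induction l with
  | nil => simp [maxPairA]
  | cons x r ih => simp only [maxPairA]; split_ifs with h <;> [omega; exact ih]

-- one outer-loop step of A performs one maxPairA_step
theorem fOuter_step (line : List Int) (n : Int) (fs : List Int) (h1 : 1 ≤ n) (h9 : n ≤ 9)
    (ih : fOuter line fs = maxPairA (n - 1) line) :
    fOuter line (n :: fs) = maxPairA n line := by
  rw [maxPairA_step n h1 line]
  simp only [fOuter]
  cases hidx : PySem.List.index? line n with
  | none =>
    simp only []
    have hni : n ∉ line := (PySem.List.index?_eq_none_iff line n).1 hidx
    have hc : contrib n line = 0 := by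
      simp [contrib, afterFirst_eq_none n line hni]
    rw [ih, hc]
    have := maxPairA_nonneg (n - 1) line
    omega
  | some i =>
    simp only []
    obtain ⟨pre, suf, hl, hlen, hnp⟩ := (PySem.List.index?_eq_some_iff line n i).1 hidx
    have haf : afterFirst n line = some suf := by rw [hl]; exact afterFirst_append n pre suf hnp
    have hslice : PySem.List.slice line (some ((i : Int) + 1)) none = suf := by
      rw [show ((i : Int) + 1) = (((i + 1 : Nat)) : Int) by push_cast; ring,
        PySem.List.slice_from_natCast, hl,
        show pre ++ n :: suf = (pre ++ [n]) ++ suf by simp,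
        show i + 1 = (pre ++ [n]).length by simp [hlen]]
      exact List.drop_left
    have hc : contrib n line = maxWith n suf := by simp [contrib, haf]
    rw [hslice, fInner_char]
    have hmw := maxWith_eq n suf h1
    by_cases hz : maxDigit suf ≤ 0
    · rw [if_pos hz]
      simp only []
      rw [ih, hc, hmw, if_pos hz]
      have := maxPairA_nonneg (n - 1) line
      omega
    · rw [if_neg hz]
      simp only []
      rw [hc, hmw, if_neg hz]
      have := maxPairA_le (n - 1) line
      have := maxDigit_le suf
      have := maxDigit_nonneg suf
      omega

-- A computes the max pair value
theorem f_eq_maxPairA (line : List Int) : f line = maxPairA 9 line := by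
  have hr : PySem.List.pyRange 9 0 (-1) = [9, 8, 7, 6, 5, 4, 3, 2, 1] := by decide
  have h0 : fOuter line [] = maxPairA 0 line := by rw [maxPairA_zero]; rfl
  have h1 := fOuter_step line 1 [] (by omega) (by omega) (by norm_num; exact h0)
  have h2 := fOuter_step line 2 [1] (by omega) (by omega) (by norm_num; exact h1)
  have h3 := fOuter_step line 3 [2, 1] (by omega) (by omega) (by norm_num; exact h2)
  have h4 := fOuter_step line 4 [3, 2, 1] (by omega) (by omega) (by norm_num; exact h3)
  have h5 := fOuter_step line 5 [4, 3, 2, 1] (by omega) (by omega) (by norm_num; exact h4)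
  have h6 := fOuter_step line 6 [5, 4, 3, 2, 1] (by omega) (by omega) (by norm_num; exact h5)
  have h7 := fOuter_step line 7 [6, 5, 4, 3, 2, 1] (by omega) (by omega) (by norm_num; exact h6)
  have h8 := fOuter_step line 8 [7, 6, 5, 4, 3, 2, 1] (by omega) (by omega) (by norm_num; exact h7)
  have h9 := fOuter_step line 9 [8, 7, 6, 5, 4, 3, 2, 1] (by omega) (by omega) (by norm_num; exact h8)
  rw [f, hr]
  exact h9

def optW : Option Int → List Int → Int
  | none, _ => 0
  | some m, l => maxWith m l

-- B's loop invariant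
theorem fAlt_loop (l : List Int) (best : Int) (mf : Option Int) (hb : 0 ≤ best) :
    (l.foldl fAltStep (best, mf)).1 = max best (max (optW mf l) (maxPairA 9 l)) := by
  induction l generalizing best mf with
  | nil =>
    cases mf <;> simp only [List.foldl_nil, optW, maxWith, maxPairA] <;> omega
  | cons x r ih =>
    simp only [List.foldl_cons, fAltStep]
    by_cases hx : 1 ≤ x ∧ x ≤ 9
    · rw [if_pos hx]
      cases mf with
      | none =>
        rw [ih best (some x) hb]
        have hw := maxWith_nonneg x r
        have hp := maxPairA_nonneg 9 r
        simp only [optW, maxPairA, if_pos hx]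
        omega
      | some m =>
        rw [ih (max best (10 * m + x)) (some (max m x)) (le_trans hb (le_max_left _ _))]
        simp only [optW, maxWith, maxPairA, if_pos hx]
        rw [maxWith_max]
        omega
    · rw [if_neg hx]
      rw [ih best mf hb]
      cases mf with
      | none => simp only [optW, maxPairA, if_neg hx]
      | some m => simp only [optW, maxWith, maxPairA, if_neg hx]

theorem fAlt_eq_maxPairA (line : List Int) : f_alt line = maxPairA 9 line := by
  rw [f_alt, fAlt_loop line 0 none le_rfl]
  have := maxPairA_nonneg 9 line
  simp only [optW]
  omega

-- ===== VERDICT (by name: the statement is the Claim_ definition above) =====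
theorem f_spec : Claim_equal_f := by
  intro line _
  unfold Spec_f
  rw [f_eq_maxPairA, fAlt_eq_maxPairA]
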